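-- pv_equiv track=rewrite | github.com/yantor3d/AdventOfCode2023 | src/advent/day_13.py | is_mirrored_at
-- ===== SOURCE A (Python) =====
-- from typing import List, Tuple
--
-- def is_mirrored_at(
--     pattern: List[str], s: int, e: int, max_smudge: int = 0, num_smudge: int = 0
-- ) -> bool:
--     if s < 0:
--         return num_smudge == max_smudge
--
--     if e == len(pattern):
--         return num_smudge == max_smudge
--
--     if num_smudge > max_smudge:
--         return False
--
--     if is_mirrored(pattern[s], pattern[e]):
--         return True and is_mirrored_at(pattern, s - 1, e + 1, max_smudge, num_smudge)
--     elif max_smudge and is_smudged(pattern[s], pattern[e]):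
--         return True and is_mirrored_at(pattern, s - 1, e + 1, max_smudge, num_smudge + 1)
--     else:
--         return False
--
-- def is_mirrored(lhs: str, rhs: str) -> bool:
--     return lhs == rhs
--
-- def is_smudged(lhs: str, rhs: str) -> bool:
--     return [a == b for a, b in zip(lhs, rhs)].count(False) == 1
-- ===== SOURCE B (Python) =====
-- def is_mirrored_at(pattern, s, e, max_smudge=0, num_smudge=0):
--     if s < 0 or e == len(pattern):
--         return num_smudge == max_smudge
--     total = num_smudge
--     for a, b in zip(pattern[:s + 1][::-1], pattern[e:]):
--         if a == b:
--             continue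
--         if max_smudge and sum(x != y for x, y in zip(a, b)) == 1:
--             total += 1
--         else:
--             return False
--     return total == max_smudge
-- ===== Notes on version B (the rewrite author's own statement) =====
-- stated objective: simpler
-- what changed: Replaces the tail recursion over (s,e,num_smudge) by a single pass: slice the left rows reversed and the right rows, zip them, and count smudges in one loop with a final count==max_smudge check.
-- outside the precondition, e.g. on is_mirrored_at(['', '.#', '#..'], 2, -1, 0, 0): A returns False, B returns True; on is_mirrored_at(['ab'], 3, 0, 0, 0): A raises IndexError, B returns True
import Mathlib
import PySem

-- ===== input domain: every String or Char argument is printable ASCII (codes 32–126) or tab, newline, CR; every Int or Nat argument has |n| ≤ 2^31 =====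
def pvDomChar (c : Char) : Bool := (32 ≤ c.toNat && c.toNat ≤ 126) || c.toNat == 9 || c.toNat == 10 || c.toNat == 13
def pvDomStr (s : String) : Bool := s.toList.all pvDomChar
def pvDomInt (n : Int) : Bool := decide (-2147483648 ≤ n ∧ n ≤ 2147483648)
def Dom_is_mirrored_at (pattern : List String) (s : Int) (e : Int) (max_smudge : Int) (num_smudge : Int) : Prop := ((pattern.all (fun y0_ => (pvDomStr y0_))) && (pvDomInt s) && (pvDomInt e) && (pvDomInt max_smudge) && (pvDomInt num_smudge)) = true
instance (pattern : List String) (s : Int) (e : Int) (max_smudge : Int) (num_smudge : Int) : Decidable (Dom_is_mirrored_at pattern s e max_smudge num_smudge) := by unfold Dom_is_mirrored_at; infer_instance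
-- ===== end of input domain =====

-- B replaces A's tail recursion by one zip-and-count pass over slices; equivalence is about return values only.

-- ===== PORT A =====
def is_mirrored (lhs : String) (rhs : String) : Bool := lhs == rhs

def is_smudged (lhs : String) (rhs : String) : Bool :=
  PySem.List.count ((lhs.toList.zip rhs.toList).map (fun p => p.1 == p.2)) false == 1

def is_mirrored_at (pattern : List String) (s : Int) (e : Int) (max_smudge : Int) (num_smudge : Int) : Bool :=
  if s < 0 then num_smudge == max_smudge
  else if e == (pattern.length : Int) then num_smudge == max_smudge
  else if num_smudge > max_smudge then false
  else
    match hps : PySem.List.pyGet? pattern s, hpe : PySem.List.pyGet? pattern e with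
    | some ps, some pe =>
      if is_mirrored ps pe then is_mirrored_at pattern (s - 1) (e + 1) max_smudge num_smudge
      else if max_smudge != 0 && is_smudged ps pe then
        is_mirrored_at pattern (s - 1) (e + 1) max_smudge (num_smudge + 1)
      else false
    | _, _ => false  -- Python raises IndexError here; excluded by Pre_
termination_by ((pattern.length : Int) - e).toNat
decreasing_by
  all_goals
    have h : ¬ (PySem.List.pyGet? pattern e = none) := by simp [hpe]
    rw [PySem.List.pyGet?_eq_none_iff] at h
    unfold PySem.Raise.InRange at h
    omega

-- ===== PORT B =====
def pvSmudgeSum (a : String) (b : String) : Int :=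
  ((a.toList.zip b.toList).map (fun p => if p.1 != p.2 then (1 : Int) else 0)).sum

def pvStep (max_smudge : Int) (acc : Option Int) (p : String × String) : Option Int :=
  match acc with
  | none => none
  | some t =>
    if p.1 == p.2 then some t
    else if max_smudge != 0 && pvSmudgeSum p.1 p.2 == 1 then some (t + 1)
    else none

def is_mirrored_at_alt (pattern : List String) (s : Int) (e : Int) (max_smudge : Int) (num_smudge : Int) : Bool :=
  if s < 0 || e == (pattern.length : Int) then num_smudge == max_smudge
  else
    match ((PySem.List.slice pattern none (some (s + 1))).reverse.zip
        (PySem.List.slice pattern (some e) none)).foldl (pvStep max_smudge) (some num_smudge) with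
    | none => false
    | some t => t == max_smudge

-- ===== PRECONDITION & SPEC =====
-- Pre_ excludes inputs where A raises IndexError (an index reached out of range) and, with it, inputs
-- with a negative e, where A's value relies on accidental negative-index wraparound.
def Pre_is_mirrored_at (pattern : List String) (s : Int) (e : Int) (max_smudge : Int) (num_smudge : Int) : Prop :=
  s < 0 ∨ e = (pattern.length : Int) ∨ max_smudge < num_smudge ∨
    (s < (pattern.length : Int) ∧ 0 ≤ e ∧ e ≤ (pattern.length : Int))
instance (pattern : List String) (s : Int) (e : Int) (max_smudge : Int) (num_smudge : Int) : Decidable (Pre_is_mirrored_at pattern s e max_smudge num_smudge) := by unfold Pre_is_mirrored_at; infer_instance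

def pvWitness_is_mirrored_at : List String × Int × Int × Int × Int := (["#.", "..", "..", "##"], 1, 2, 1, 0)

def Spec_is_mirrored_at (pattern : List String) (s : Int) (e : Int) (max_smudge : Int) (num_smudge : Int) (out : Bool) : Prop := out = is_mirrored_at_alt pattern s e max_smudge num_smudge
instance (pattern : List String) (s : Int) (e : Int) (max_smudge : Int) (num_smudge : Int) (out : Bool) : Decidable (Spec_is_mirrored_at pattern s e max_smudge num_smudge out) := by unfold Spec_is_mirrored_at; infer_instance

-- ===== CLAIM (what is proved, stated in full; the proofs are below) =====
def Claim_equal_is_mirrored_at : Prop := ∀ (pattern : List String) (s : Int) (e : Int) (max_smudge : Int) (num_smudge : Int), Dom_is_mirrored_at pattern s e max_smudge num_smudge → Pre_is_mirrored_at pattern s e max_smudge num_smudge → Spec_is_mirrored_at pattern s e max_smudge num_smudge (is_mirrored_at pattern s e max_smudge num_smudge)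

-- ===== LEMMAS AND PROOFS =====

-- fold over `none` stays `none`
theorem pv_fold_none (mx : Int) : ∀ (l : List (String × String)),
    l.foldl (pvStep mx) none = none := by
  intro l; induction l with
  | nil => rfl
  | cons p l ih => simpa [pvStep] using ih

-- the accumulator of B's fold never decreases
theorem pv_fold_mono (mx : Int) : ∀ (l : List (String × String)) (t r : Int),
    l.foldl (pvStep mx) (some t) = some r → t ≤ r := by
  intro l
  induction l with
  | nil => intro t r h; simp at h; omega
  | cons p l ih =>
    intro t r h
    simp only [List.foldl_cons, pvStep] at h
    split at h
    · exact ih t r h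
    · split at h
      · have := ih (t + 1) r h; omega
      · rw [pv_fold_none] at h; exact absurd h (by simp)

-- A's smudge test agrees with B's mismatch sum
theorem pv_smudge_eq (a b : String) : is_smudged a b = (pvSmudgeSum a b == 1) := by
  unfold is_smudged pvSmudgeSum
  rw [PySem.List.count_eq]
  rw [PySem.List.sum_map_ite_one_zero]
  rw [List.count_eq_countP, List.countP_map]
  have hcp : ((a.toList.zip b.toList).countP ((fun x => x == false) ∘ fun p => p.1 == p.2))
      = (a.toList.zip b.toList).countP (fun p => p.1 != p.2) := by
    apply List.countP_congr
    intro p _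
    by_cases h : p.1 = p.2 <;> simp [h]
  rw [hcp]
  cases hc : (a.toList.zip b.toList).countP (fun p => p.1 != p.2) == 1
  all_goals simp_all [Nat.eq_iff_le_and_ge]
  all_goals omega

-- B, characterised as a fold over the zipped take/drop lists (valid whenever s < n, 0 ≤ e ≤ n)
theorem pv_B_char (pattern : List String) (s e mx num : Int) (he0 : 0 ≤ e) :
    is_mirrored_at_alt pattern s e mx num =
      (match ((pattern.take (s + 1).toNat).reverse.zip (pattern.drop e.toNat)).foldl
          (pvStep mx) (some num) with
       | none => false
       | some t => t == mx) := by
  unfold is_mirrored_at_alt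
  by_cases hs : s < 0
  · have h1 : (s + 1).toNat = 0 := by omega
    simp [hs, h1]
  · by_cases he : e = (pattern.length : Int)
    · simp [he]
    · have hg : ¬(s < 0 || e == (pattern.length : Int)) = true := by
        simp [hs, he]
      rw [if_neg hg]
      rw [PySem.List.slice_to pattern (show (0:Int) ≤ s + 1 by omega),
          PySem.List.slice_from pattern he0]

-- one mirrored pair peels off the zip
theorem pv_zip_step (pattern : List String) (s e : Int) (ps pe : String)
    (hs0 : 0 ≤ s) (he0 : 0 ≤ e)
    (hps : PySem.List.pyGet? pattern s = some ps)
    (hpe : PySem.List.pyGet? pattern e = some pe) :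
    (pattern.take (s + 1).toNat).reverse.zip (pattern.drop e.toNat)
      = (ps, pe) :: ((pattern.take (s - 1 + 1).toNat).reverse.zip (pattern.drop (e + 1).toNat)) := by
  rw [PySem.List.pyGet?_of_nonneg pattern hs0] at hps
  rw [PySem.List.pyGet?_of_nonneg pattern he0] at hpe
  have hslt : s.toNat < pattern.length := by
    by_contra h
    rw [List.getElem?_eq_none (by omega)] at hps; exact absurd hps (by simp)
  have helt : e.toNat < pattern.length := by
    by_contra h
    rw [List.getElem?_eq_none (by omega)] at hpe; exact absurd hpe (by simp)
  have h1 : (s + 1).toNat = s.toNat + 1 := by omega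
  have h2 : (s - 1 + 1).toNat = s.toNat := by omega
  have h3 : (e + 1).toNat = e.toNat + 1 := by omega
  rw [h1, h2, h3]
  rw [List.take_add_one, List.drop_eq_getElem_cons helt]
  have hps' : pattern[s.toNat] = ps := by
    rwa [List.getElem?_eq_getElem hslt, Option.some.injEq] at hps
  have hpe' : pattern[e.toNat] = pe := by
    rwa [List.getElem?_eq_getElem helt, Option.some.injEq] at hpe
  rw [List.getElem?_eq_getElem hslt]
  simp [hps', hpe']

theorem pv_main : ∀ (pattern : List String) (s e max_smudge num_smudge : Int),
    Pre_is_mirrored_at pattern s e max_smudge num_smudge →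
    is_mirrored_at pattern s e max_smudge num_smudge
      = is_mirrored_at_alt pattern s e max_smudge num_smudge := by
  intro pattern s e mx num hpre
  fun_induction is_mirrored_at pattern s e mx num with
  | case1 s e num hs =>
    simp [is_mirrored_at_alt, hs]
  | case2 s e num hs he =>
    have he' : e = (pattern.length : Int) := by simpa using he
    simp [is_mirrored_at_alt, he']
  | case3 s e num hs he hnum =>
    unfold is_mirrored_at_alt
    rw [if_neg (by simp_all)]
    split
    · rfl
    · next t hf =>
        have := pv_fold_mono mx _ num t hf
        have ht : t ≠ mx := by omega
        simp [ht]
  | case4 s e num hs he hnum ps pe hps hpe hmir ih =>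
    unfold Pre_is_mirrored_at at hpre
    have he2 : ¬ e = (pattern.length : Int) := by simpa using he
    have hb : s < (pattern.length : Int) ∧ 0 ≤ e ∧ e ≤ (pattern.length : Int) := by tauto
    rw [ih (by unfold Pre_is_mirrored_at; omega)]
    rw [pv_B_char pattern s e mx num (by omega),
        pv_B_char pattern (s - 1) (e + 1) mx num (by omega)]
    rw [pv_zip_step pattern s e ps pe (by omega) (by omega) hps hpe]
    rw [List.foldl_cons]
    have hstep : pvStep mx (some num) (ps, pe) = some num := by
      unfold is_mirrored at hmir
      simp [pvStep, hmir]
    rw [hstep]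
  | case5 s e num hs he hnum ps pe hps hpe hmir hsm ih =>
    unfold Pre_is_mirrored_at at hpre
    have he2 : ¬ e = (pattern.length : Int) := by simpa using he
    have hb : s < (pattern.length : Int) ∧ 0 ≤ e ∧ e ≤ (pattern.length : Int) := by tauto
    rw [ih (by unfold Pre_is_mirrored_at; omega)]
    rw [pv_B_char pattern s e mx num (by omega),
        pv_B_char pattern (s - 1) (e + 1) mx (num + 1) (by omega)]
    rw [pv_zip_step pattern s e ps pe (by omega) (by omega) hps hpe]
    rw [List.foldl_cons]
    have hstep : pvStep mx (some num) (ps, pe) = some (num + 1) := by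
      unfold is_mirrored at hmir
      rw [pv_smudge_eq] at hsm
      simp only [Bool.not_eq_true] at hmir
      simp [pvStep, hmir, hsm]
    rw [hstep]
  | case6 s e num hs he hnum ps pe hps hpe hmir hsm =>
    unfold Pre_is_mirrored_at at hpre
    have he2 : ¬ e = (pattern.length : Int) := by simpa using he
    have hb : s < (pattern.length : Int) ∧ 0 ≤ e ∧ e ≤ (pattern.length : Int) := by tauto
    rw [pv_B_char pattern s e mx num (by omega)]
    rw [pv_zip_step pattern s e ps pe (by omega) (by omega) hps hpe]
    rw [List.foldl_cons]
    have hstep : pvStep mx (some num) (ps, pe) = none := by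
      unfold is_mirrored at hmir
      rw [pv_smudge_eq] at hsm
      simp only [Bool.not_eq_true] at hmir
      simp [pvStep, hmir, hsm]
    rw [hstep, pv_fold_none]
  | case7 s e num hs he hnum hnone =>
    exfalso
    unfold Pre_is_mirrored_at at hpre
    have he2 : ¬ e = (pattern.length : Int) := by simpa using he
    have hb : s < (pattern.length : Int) ∧ 0 ≤ e ∧ e ≤ (pattern.length : Int) := by tauto
    cases hgs : PySem.List.pyGet? pattern s with
    | none =>
      rw [PySem.List.pyGet?_eq_none_iff] at hgs
      exact hgs (by unfold PySem.Raise.InRange; omega)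
    | some ps =>
      cases hge : PySem.List.pyGet? pattern e with
      | none =>
        rw [PySem.List.pyGet?_eq_none_iff] at hge
        exact hge (by unfold PySem.Raise.InRange; omega)
      | some pe => exact hnone ps pe hgs hge


-- ===== VERDICT (by name: the statement is the Claim_ definition above) =====
theorem is_mirrored_at_spec : Claim_equal_is_mirrored_at := by
  intro pattern s e mx num _ hpre
  unfold Spec_is_mirrored_at
  exact pv_main pattern s e mx num hpre
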